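-- pv_equiv track=rewrite | github.com/bh3r1th/slm-selective-grounding | scripts/03_build_external_corpus.py | _chunk_tokens
-- ===== SOURCE A (Python) =====
-- from typing import Any, Iterable, Mapping
--
-- def _chunk_tokens(tokens: list[str], max_tokens: int, overlap: int) -> Iterable[list[str]]:
--     if max_tokens <= 0:
--         raise ValueError("chunk_tokens must be positive")
--     if overlap < 0:
--         raise ValueError("chunk_overlap must be non-negative")
--     step = max_tokens if overlap == 0 else max_tokens - overlap
--     if step <= 0:
--         raise ValueError("chunk_overlap must be smaller than chunk_tokens")
--     start = 0
--     while start < len(tokens):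
--         end = min(start + max_tokens, len(tokens))
--         yield tokens[start:end]
--         if end == len(tokens):
--             break
--         start += step
-- ===== SOURCE B (Python) =====
-- def _chunk_tokens(tokens: list[str], max_tokens: int, overlap: int):
--     if max_tokens <= 0:
--         raise ValueError("chunk_tokens must be positive")
--     if overlap < 0:
--         raise ValueError("chunk_overlap must be non-negative")
--     step = max_tokens if overlap == 0 else max_tokens - overlap
--     if step <= 0:
--         raise ValueError("chunk_overlap must be smaller than chunk_tokens")
--     n = len(tokens)
--     # closed-form chunk count: ceil((n - max_tokens) / step) + 1, at least 1, 0 for empty input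
--     count = 0 if n == 0 else max(1, -((max_tokens - n) // step) + 1)
--     for i in range(count):
--         start = i * step
--         yield tokens[start:start + max_tokens]
-- ===== Notes on version B (the rewrite author's own statement) =====
-- stated objective: alternative
-- what changed: replaces the while/break loop with end-check by a closed-form ceiling-division chunk count and a for-range over chunk indices with plain slicing
import Mathlib
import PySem

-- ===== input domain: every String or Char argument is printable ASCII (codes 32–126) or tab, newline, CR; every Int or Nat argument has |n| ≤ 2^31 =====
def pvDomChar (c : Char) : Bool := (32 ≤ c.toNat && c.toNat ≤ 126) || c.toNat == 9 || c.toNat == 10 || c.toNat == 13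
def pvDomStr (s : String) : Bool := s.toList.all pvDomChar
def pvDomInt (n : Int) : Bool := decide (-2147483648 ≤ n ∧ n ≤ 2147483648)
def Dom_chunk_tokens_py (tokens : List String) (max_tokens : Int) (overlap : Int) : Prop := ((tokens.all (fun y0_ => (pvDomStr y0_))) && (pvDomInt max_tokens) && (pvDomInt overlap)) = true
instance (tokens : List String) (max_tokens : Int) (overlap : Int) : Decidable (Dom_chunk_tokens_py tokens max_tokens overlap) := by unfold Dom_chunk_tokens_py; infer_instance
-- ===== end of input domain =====

-- B replaces A's while/break loop by a closed-form ceiling-division chunk count and a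
-- for-range over chunk indices (objective: alternative decomposition; return value only —
-- both Pythons are generators, equivalence is about the materialised sequence of chunks).

-- ===== PORT A =====
-- the while-loop of A: fuel bounds the recursion (each iteration advances start by step ≥ 1
-- on every admitted input, so tokens.length + 1 fuel is never exhausted inside Pre_)
def chunkA_loop (tokens : List String) (max_tokens step : Int) (start : Int) (fuel : Nat) : List (List String) :=
  match fuel with
  | 0 => []
  | fuel + 1 =>
    if start < (tokens.length : Int) then
      let e := min (start + max_tokens) (tokens.length : Int)
      let chunk := PySem.List.slice tokens (some start) (some e)
      if e = (tokens.length : Int) then [chunk]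
      else chunk :: chunkA_loop tokens max_tokens step (start + step) fuel
    else []

def chunk_tokens_py (tokens : List String) (max_tokens : Int) (overlap : Int) : List (List String) :=
  let step := if overlap = 0 then max_tokens else max_tokens - overlap
  chunkA_loop tokens max_tokens step 0 (tokens.length + 1)

-- ===== PORT B =====
def chunk_tokens_py_alt (tokens : List String) (max_tokens : Int) (overlap : Int) : List (List String) :=
  let step := if overlap = 0 then max_tokens else max_tokens - overlap
  let n : Int := tokens.length
  let count : Int := if n = 0 then 0 else max 1 (-(PySem.Int.floordiv (max_tokens - n) step) + 1)
  (PySem.List.pyRange 0 count 1).map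
    (fun i => PySem.List.slice tokens (some (i * step)) (some (i * step + max_tokens)))

-- ===== PRECONDITION & SPEC =====
-- Pre_ excludes exactly the inputs on which A raises ValueError (non-positive max_tokens,
-- negative overlap, or step = max_tokens - overlap ≤ 0 with overlap ≠ 0).
def Pre_chunk_tokens_py (tokens : List String) (max_tokens : Int) (overlap : Int) : Prop :=
  0 < max_tokens ∧ 0 ≤ overlap ∧ (overlap = 0 ∨ overlap < max_tokens)
instance (tokens : List String) (max_tokens : Int) (overlap : Int) : Decidable (Pre_chunk_tokens_py tokens max_tokens overlap) := by unfold Pre_chunk_tokens_py; infer_instance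

def pvWitness_chunk_tokens_py : List String × Int × Int := (["a", "b", "c"], 2, 1)

def Spec_chunk_tokens_py (tokens : List String) (max_tokens : Int) (overlap : Int) (out : List (List String)) : Prop := out = chunk_tokens_py_alt tokens max_tokens overlap
instance (tokens : List String) (max_tokens : Int) (overlap : Int) (out : List (List String)) : Decidable (Spec_chunk_tokens_py tokens max_tokens overlap out) := by unfold Spec_chunk_tokens_py; infer_instance

-- ===== CLAIM (what is proved, stated in full; the proofs are below) =====
def Claim_equal_chunk_tokens_py : Prop := ∀ (tokens : List String) (max_tokens : Int) (overlap : Int), Dom_chunk_tokens_py tokens max_tokens overlap → Pre_chunk_tokens_py tokens max_tokens overlap → Spec_chunk_tokens_py tokens max_tokens overlap (chunk_tokens_py tokens max_tokens overlap)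

-- ===== LEMMAS AND PROOFS =====

-- slicing past the end clamps: the upper bound may be replaced by min with the length
lemma slice_min_len (xs : List String) (a b : Int) (ha : 0 ≤ a) (hb : 0 ≤ b) :
    PySem.List.slice xs (some a) (some (min b (xs.length : Int))) =
      PySem.List.slice xs (some a) (some b) := by
  rcases le_total b (xs.length : Int) with h | h
  · rw [min_eq_left h]
  · rw [min_eq_right h]
    rw [PySem.List.slice_toNat xs ha (by positivity), PySem.List.slice_toNat xs ha hb]
    rcases le_total xs.length a.toNat with hax | hax
    · rw [List.drop_eq_nil_of_le hax]; simp
    · rw [List.take_of_length_le, List.take_of_length_le] <;>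
        simp only [List.length_drop] <;> omega

-- A's loop, started at the i-th chunk boundary, produces B's chunks i, i+1, …, count-1
lemma chunkA_loop_eq (tokens : List String) (max_tokens step count : Int)
    (hstep : 1 ≤ step)
    (Hlast : (count - 1) * step < (tokens.length : Int))
    (Hstop : (tokens.length : Int) ≤ (count - 1) * step + max_tokens)
    (Hmid : ∀ j : Int, 0 ≤ j → j < count - 1 → j * step + max_tokens < (tokens.length : Int)) :
    ∀ (fuel : Nat) (i : Int), 0 ≤ i → i < count → (count - i).toNat ≤ fuel →
      chunkA_loop tokens max_tokens step (i * step) fuel =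
        (PySem.List.pyRange i count 1).map
          (fun j => PySem.List.slice tokens (some (j * step)) (some (j * step + max_tokens))) := by
  intro fuel
  induction fuel with
  | zero => intro i hi hic hfuel; omega
  | succ fuel ih =>
    intro i hi hic hfuel
    have hmono : i * step ≤ (count - 1) * step :=
      mul_le_mul_of_nonneg_right (by omega) (by omega)
    have hstart : i * step < (tokens.length : Int) := lt_of_le_of_lt hmono Hlast
    have hs0 : 0 ≤ i * step := mul_nonneg hi (by omega)
    rw [PySem.List.pyRange_one_cons hic]
    simp only [chunkA_loop, if_pos hstart, List.map_cons]
    by_cases hlastc : i = count - 1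
    · -- final chunk: end = len, break
      have hend : min (i * step + max_tokens) (tokens.length : Int) = (tokens.length : Int) := by
        rw [min_eq_right]; rw [hlastc]; exact Hstop
      have heq : PySem.List.slice tokens (some (i * step)) (some ((tokens.length : Int))) =
          PySem.List.slice tokens (some (i * step)) (some (i * step + max_tokens)) := by
        have h := slice_min_len tokens (i * step) (i * step + max_tokens) hs0
          (by have := lt_of_lt_of_le hstart hend.symm.le; omega)
        rwa [hend] at h
      have hrest : PySem.List.pyRange (i + 1) count 1 = [] := by
        rw [PySem.List.pyRange_one]
        have h0 : (count - (i + 1)).toNat = 0 := by omega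
        rw [h0]; simp
      rw [hend, if_pos rfl, hrest, List.map_nil, heq]
    · -- middle chunk: end = start + max_tokens < len, recurse
      have hj : i * step + max_tokens < (tokens.length : Int) := Hmid i hi (by omega)
      have hend : min (i * step + max_tokens) (tokens.length : Int) = i * step + max_tokens :=
        min_eq_left (le_of_lt hj)
      rw [hend, if_neg (by omega)]
      have hcomm : i * step + step = (i + 1) * step := by ring
      rw [hcomm, ih (i + 1) (by omega) (by omega) (by omega)]

theorem chunk_tokens_py_spec_aux (tokens : List String) (max_tokens : Int) (overlap : Int)
    (hpre : Pre_chunk_tokens_py tokens max_tokens overlap) :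
    chunk_tokens_py tokens max_tokens overlap = chunk_tokens_py_alt tokens max_tokens overlap := by
  obtain ⟨hmax, hov, hcase⟩ := hpre
  show chunkA_loop tokens max_tokens
        (if overlap = 0 then max_tokens else max_tokens - overlap) 0 (tokens.length + 1) =
      (PySem.List.pyRange 0
        (if (tokens.length : Int) = 0 then 0 else
          max 1 (-(PySem.Int.floordiv (max_tokens - (tokens.length : Int))
                    (if overlap = 0 then max_tokens else max_tokens - overlap)) + 1)) 1).map
        (fun i => PySem.List.slice tokens
          (some (i * (if overlap = 0 then max_tokens else max_tokens - overlap)))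
          (some (i * (if overlap = 0 then max_tokens else max_tokens - overlap) + max_tokens)))
  set step := if overlap = 0 then max_tokens else max_tokens - overlap with hstepdef
  have hstep : 1 ≤ step := by
    rcases hcase with h | h <;> simp [hstepdef, h] <;> omega
  have hsm : step ≤ max_tokens := by
    by_cases h : overlap = 0 <;> simp [hstepdef, h] <;> omega
  by_cases hzero : (tokens.length : Int) = 0
  · -- empty input: loop exits immediately, count = 0
    have htok : tokens = [] := by
      have : tokens.length = 0 := by exact_mod_cast hzero
      exact List.length_eq_zero_iff.mp this
    subst htok
    rw [if_pos hzero, PySem.List.pyRange_one]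
    simp [chunkA_loop]
  · have hnpos : 0 < (tokens.length : Int) :=
      lt_of_le_of_ne (by exact_mod_cast Nat.zero_le _) (Ne.symm hzero)
    set q : Int := PySem.Int.floordiv (max_tokens - (tokens.length : Int)) step with hqdef
    have hq : q * step ≤ max_tokens - (tokens.length : Int) ∧
        max_tokens - (tokens.length : Int) < (q + 1) * step :=
      (PySem.Int.floordiv_eq_iff_of_pos (by omega)).mp hqdef.symm
    set count : Int := max 1 (-q + 1) with hcount
    have hc1 : 1 ≤ count := le_max_left _ _
    have hc2 : -q + 1 ≤ count := le_max_right _ _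
    have hch : count = 1 ∨ count = -q + 1 := max_choice 1 (-q + 1)
    have Hstop : (tokens.length : Int) ≤ (count - 1) * step + max_tokens := by
      rcases hch with h | h
      · have hq0 : 0 ≤ q := by omega
        have := mul_nonneg hq0 (by omega : (0:Int) ≤ step)
        rw [h]; nlinarith [hq.1]
      · rw [h]; nlinarith [hq.1]
    have Hmid : ∀ j : Int, 0 ≤ j → j < count - 1 → j * step + max_tokens < (tokens.length : Int) := by
      intro j hj hjc
      have hcv : count = -q + 1 := by rcases hch with h | h <;> omega
      have hjq : j ≤ -q - 1 := by omega
      have hmj : j * step ≤ (-q - 1) * step := mul_le_mul_of_nonneg_right hjq (by omega)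
      nlinarith [hq.2]
    have Hlast : (count - 1) * step < (tokens.length : Int) := by
      rcases hch with h | h
      · rw [h]; simpa using hnpos
      · rw [h]; nlinarith [hq.2]
    have hcn : count ≤ (tokens.length : Int) := by
      have h1 : count - 1 ≤ (count - 1) * step := le_mul_of_one_le_right (by omega) hstep
      omega
    rw [if_neg hzero]
    have hmain := chunkA_loop_eq tokens max_tokens step count hstep Hlast Hstop Hmid
      (tokens.length + 1) 0 le_rfl (by omega) (by omega)
    rw [zero_mul] at hmain
    rw [hmain]

-- ===== VERDICT (by name: the statement is the Claim_ definition above) =====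
theorem chunk_tokens_py_spec : Claim_equal_chunk_tokens_py := by
  intro tokens max_tokens overlap _ hpre
  exact chunk_tokens_py_spec_aux tokens max_tokens overlap hpre
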